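-- pv_equiv track=rewrite | github.com/mikecomputerscience/leetcode | round_1.py | power_of_three
-- ===== SOURCE A (Python) =====
-- def power_of_three(n):
--     if n == 0 or n == 2:
--         return False
--     if n == 1 or n == 3:
--         return True
--     while not (n % 3):
--         n //= 3
--         if n == 3:
--             return True
--     return False
-- ===== SOURCE B (Python) =====
-- def power_of_three(n):
--     if n < 1:
--         return False
--     p = 1
--     while p < n:
--         p *= 3
--     return p == n
-- ===== Notes on version B (the rewrite author's own statement) =====
-- stated objective: alternative
-- what changed: B multiplies a running power of three upward from one until it reaches or passes n and checks for an exact hit, instead of A's repeated divide-down with divisibility tests and special-cased small values.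
import Mathlib
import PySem

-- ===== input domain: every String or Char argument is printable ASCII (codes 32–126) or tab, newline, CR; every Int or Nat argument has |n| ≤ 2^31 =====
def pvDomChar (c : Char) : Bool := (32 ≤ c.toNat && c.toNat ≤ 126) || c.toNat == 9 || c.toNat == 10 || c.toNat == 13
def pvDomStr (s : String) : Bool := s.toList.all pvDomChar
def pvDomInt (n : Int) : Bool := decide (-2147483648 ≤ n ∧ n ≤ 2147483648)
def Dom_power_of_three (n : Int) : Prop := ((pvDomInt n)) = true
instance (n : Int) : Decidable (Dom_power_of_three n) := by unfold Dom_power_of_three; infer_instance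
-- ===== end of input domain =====

-- B replaces A's divide-down loop by multiplying a running power of three up from 1 (alternative decomposition, same cost).


-- ===== PORT A =====
-- the 'while not (n % 3)' loop; fuel n.natAbs only makes the recursion total (each
-- executed iteration divides |n| by 3, so the fuel is never exhausted on a reachable path)
def potLoopA : Nat → Int → Bool
  | 0, _ => false
  | fuel + 1, n =>
    if PySem.Int.mod n 3 = 0 then
      let n' := PySem.Int.floordiv n 3
      if n' = 3 then true else potLoopA fuel n'
    else false

def power_of_three (n : Int) : Bool :=
  if n = 0 ∨ n = 2 then false
  else if n = 1 ∨ n = 3 then true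
  else potLoopA n.natAbs n

-- ===== PORT B =====
-- the 'while p < n: p *= 3' loop; fuel n.toNat bounds the iteration count (p grows by at
-- least 1 each step while p < n, so the fuel is never exhausted)
def potLoopB : Nat → Int → Int → Bool
  | 0, p, n => decide (p = n)
  | fuel + 1, p, n => if p < n then potLoopB fuel (p * 3) n else decide (p = n)

def power_of_three_alt (n : Int) : Bool :=
  if n < 1 then false else potLoopB n.toNat 1 n

-- ===== PRECONDITION & SPEC =====
def Spec_power_of_three (n : Int) (out : Bool) : Prop := out = power_of_three_alt n
instance (n : Int) (out : Bool) : Decidable (Spec_power_of_three n out) := by unfold Spec_power_of_three; infer_instance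

-- ===== CLAIM (what is proved, stated in full; the proofs are below) =====
def Claim_equal_power_of_three : Prop := ∀ (n : Int), Dom_power_of_three n → Spec_power_of_three n (power_of_three n)

-- ===== LEMMAS AND PROOFS =====

theorem potLoopA_true_iff (fuel : Nat) (n : Int) (hn : n ≠ 0) (hf : n.natAbs ≤ fuel) :
    potLoopA fuel n = true ↔ ∃ k : Nat, n = 3 ^ (k + 2) := by
  induction fuel generalizing n with
  | zero => omega
  | succ f ih =>
    simp only [potLoopA]
    by_cases hdvd : PySem.Int.mod n 3 = 0
    · have h3 : (3 : Int) ∣ n := by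
        rwa [PySem.Int.mod_eq_zero_iff_dvd] at hdvd
      obtain ⟨q, hq⟩ := h3
      have hfd : PySem.Int.floordiv n 3 = q := by
        rw [PySem.Int.floordiv_eq_ediv_of_pos (by norm_num : (0:Int) < 3), hq,
          Int.mul_ediv_cancel_left _ (by norm_num)]
      simp only [hdvd, if_true, hfd]
      by_cases h9 : q = 3
      · simp only [h9, if_true, true_iff]
        exact ⟨0, by rw [hq, h9]; norm_num⟩
      · have hq0 : q ≠ 0 := by rintro rfl; simp at hq; omega
        have habs : q.natAbs ≤ f := by
          have : n.natAbs = 3 * q.natAbs := by rw [hq]; simp [Int.natAbs_mul]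
          omega
        simp only [h9, if_false]
        rw [ih q hq0 habs]
        constructor
        · rintro ⟨k, rfl⟩; exact ⟨k + 1, by rw [hq]; ring⟩
        · rintro ⟨k, hk⟩
          rcases k with _ | k
          · exfalso; apply h9
            have : n = (9 : Int) := by rw [hk]; norm_num
            rw [this] at hq; omega
          · refine ⟨k, ?_⟩
            have : (3 : Int) * q = 3 * 3 ^ (k + 2) := by
              rw [← hq, hk]; ring
            omega
    · simp only [hdvd, if_false, Bool.false_eq_true, false_iff]
      rintro ⟨k, rfl⟩
      apply hdvd
      rw [PySem.Int.mod_eq_zero_iff_dvd]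
      exact ⟨3 ^ (k + 1), by ring⟩

theorem pow_le_of_mul_pow_eq {p n : Int} (hp : 1 ≤ p) (k : Nat) (h : p * 3 ^ k = n) :
    p ≤ n := by
  have h1 : (1 : Int) ≤ 3 ^ k := one_le_pow₀ (by norm_num)
  nlinarith

theorem potLoopB_true_iff (fuel : Nat) (p n : Int) (hp : 1 ≤ p) (hf : (n - p).toNat ≤ fuel) :
    potLoopB fuel p n = true ↔ ∃ k : Nat, p * 3 ^ k = n := by
  induction fuel generalizing p with
  | zero =>
    have hnp : n ≤ p := by omega
    simp only [potLoopB, decide_eq_true_eq]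
    constructor
    · rintro rfl; exact ⟨0, by ring⟩
    · rintro ⟨k, hk⟩
      have hle := pow_le_of_mul_pow_eq hp k hk
      have : p = n := le_antisymm hle hnp
      exact this
  | succ f ih =>
    simp only [potLoopB]
    by_cases hlt : p < n
    · simp only [hlt, if_true]
      rw [ih (p * 3) (by nlinarith) (by omega)]
      constructor
      · rintro ⟨k, hk⟩; exact ⟨k + 1, by rw [← hk]; ring⟩
      · rintro ⟨k, hk⟩
        rcases k with _ | k
        · exfalso; simp at hk; omega
        · exact ⟨k, by rw [← hk]; ring⟩
    · simp only [hlt, if_false, decide_eq_true_eq]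
      constructor
      · rintro rfl; exact ⟨0, by ring⟩
      · rintro ⟨k, hk⟩
        have hle := pow_le_of_mul_pow_eq hp k hk
        exact le_antisymm hle (by omega)

theorem power_of_three_true_iff (n : Int) :
    power_of_three n = true ↔ ∃ k : Nat, n = 3 ^ k := by
  unfold power_of_three
  by_cases h02 : n = 0 ∨ n = 2
  · simp only [h02, if_true, Bool.false_eq_true, false_iff]
    rintro ⟨k, hk⟩
    have h1 : (1 : Int) ≤ 3 ^ k := one_le_pow₀ (by norm_num)
    rcases h02 with rfl | rfl
    · omega
    · rcases k with _ | k
      · simp at hk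
      · have : (3 : Int) ^ (k + 1) = 3 * 3 ^ k := by ring
        have h1' : (1 : Int) ≤ 3 ^ k := one_le_pow₀ (by norm_num)
        omega
  · by_cases h13 : n = 1 ∨ n = 3
    · simp only [h02, h13, if_false, if_true, true_iff]
      rcases h13 with rfl | rfl
      · exact ⟨0, by norm_num⟩
      · exact ⟨1, by norm_num⟩
    · have h0 : n ≠ 0 := fun h => h02 (Or.inl h)
      have h2 : n ≠ 2 := fun h => h02 (Or.inr h)
      have h1 : n ≠ 1 := fun h => h13 (Or.inl h)
      have h3 : n ≠ 3 := fun h => h13 (Or.inr h)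
      rw [if_neg h02, if_neg h13, potLoopA_true_iff n.natAbs n h0 le_rfl]
      constructor
      · rintro ⟨k, rfl⟩; exact ⟨k + 2, rfl⟩
      · rintro ⟨k, rfl⟩
        rcases k with _ | _ | k
        · exact absurd (by norm_num) h1
        · exact absurd (by norm_num) h3
        · exact ⟨k, rfl⟩

theorem power_of_three_alt_true_iff (n : Int) :
    power_of_three_alt n = true ↔ ∃ k : Nat, n = 3 ^ k := by
  unfold power_of_three_alt
  by_cases hn : n < 1
  · simp only [hn, if_true, Bool.false_eq_true, false_iff]
    rintro ⟨k, rfl⟩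
    have : (1 : Int) ≤ 3 ^ k := one_le_pow₀ (by norm_num)
    omega
  · simp only [hn, if_false]
    rw [potLoopB_true_iff n.toNat 1 n (by norm_num) (by omega)]
    constructor
    · rintro ⟨k, hk⟩; exact ⟨k, by omega⟩
    · rintro ⟨k, hk⟩; exact ⟨k, by omega⟩

-- ===== VERDICT (by name: the statement is the Claim_ definition above) =====
theorem power_of_three_spec : Claim_equal_power_of_three := by
  intro n _
  unfold Spec_power_of_three
  rw [Bool.eq_iff_iff, power_of_three_true_iff, power_of_three_alt_true_iff]
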